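-- pv_equiv track=rewrite | github.com/keshavsingh4522/hacktoberfest | DSA/Project Euler Problems/Problem57.py | checkTerm
-- ===== SOURCE A (Python) =====
-- def checkTerm(n):
--     num = 1
--     dem = 2
--
--     for i in range(n-1):
--         num = dem*2 + num
--         num,dem = dem,num
--
--     num = dem + num
--     return len(str(num)) > len(str(dem))
-- ===== SOURCE B (Python) =====
-- def checkTerm(n):
--     # Compute the n-th convergent of sqrt(2) via fast matrix exponentiation of
--     # the Pell recurrence matrix M = [[2,1],[1,0]]: O(log n) multiplications.
--     k = n - 1 if n > 1 else 0
--     # result = identity, base = M, as 4-tuples (a, b, c, d) = [[a,b],[c,d]]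
--     ra, rb, rc, rd = 1, 0, 0, 1
--     ba, bb, bc, bd = 2, 1, 1, 0
--     while k:
--         if k & 1:
--             ra, rb, rc, rd = (ra*ba + rb*bc, ra*bb + rb*bd,
--                               rc*ba + rd*bc, rc*bb + rd*bd)
--         ba, bb, bc, bd = (ba*ba + bb*bc, ba*bb + bb*bd,
--                           bc*ba + bd*bc, bc*bb + bd*bd)
--         k >>= 1
--     dem = 2*ra + rb
--     num = 2*rc + rd
--     p = dem + num
--     return len(str(p)) > len(str(dem))
-- ===== Notes on version B (the rewrite author's own statement) =====
-- stated objective: faster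
-- what changed: Replaces the O(n) iteration of the Pell-style recurrence by fast 2x2 matrix exponentiation (repeated squaring) of M=[[2,1],[1,0]], using O(log n) big-integer multiplications to reach the same numerator/denominator pair.
import Mathlib
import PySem

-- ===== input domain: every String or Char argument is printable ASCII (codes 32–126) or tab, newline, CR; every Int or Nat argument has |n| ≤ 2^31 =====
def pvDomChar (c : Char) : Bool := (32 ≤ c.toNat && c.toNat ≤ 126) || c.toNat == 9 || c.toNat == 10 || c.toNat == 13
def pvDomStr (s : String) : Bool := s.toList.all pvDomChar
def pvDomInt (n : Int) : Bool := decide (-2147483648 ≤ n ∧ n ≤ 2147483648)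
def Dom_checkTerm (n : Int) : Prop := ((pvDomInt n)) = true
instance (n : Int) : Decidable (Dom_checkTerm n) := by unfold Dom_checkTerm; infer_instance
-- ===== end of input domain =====

-- B replaces A's O(n) iteration of the Pell-style recurrence by fast 2x2 matrix
-- exponentiation (repeated squaring), for O(log n) multiplications (objective: faster).

-- ===== PORT A =====
def checkTerm (n : Int) : Bool :=
  -- num = 1; dem = 2; for i in range(n-1): num = dem*2 + num; num, dem = dem, num
  let s := (PySem.List.pyRange 0 (n - 1) 1).foldl
             (fun (p : Int × Int) _ => (p.2, p.2 * 2 + p.1)) (1, 2)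
  -- num = dem + num; return len(str(num)) > len(str(dem))
  decide (PySem.Str.len (PySem.Int.toStr (s.2 + s.1)) > PySem.Str.len (PySem.Int.toStr s.2))

-- ===== PORT B =====
-- 2x2 integer matrix [[a,b],[c,d]]
structure Mat2 where
  a : Int
  b : Int
  c : Int
  d : Int
deriving DecidableEq, Repr

def mmul (x y : Mat2) : Mat2 :=
  ⟨x.a * y.a + x.b * y.c, x.a * y.b + x.b * y.d,
   x.c * y.a + x.d * y.c, x.c * y.b + x.d * y.d⟩

-- the while-loop of Source B: result accumulator, base squared each round, k halved
def powLoop : Mat2 → Mat2 → Nat → Mat2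
  | res, _, 0 => res
  | res, base, k + 1 =>
      powLoop (if (k + 1) % 2 = 1 then mmul res base else res) (mmul base base) ((k + 1) / 2)
termination_by _ _ k => k
decreasing_by omega

def checkTerm_alt (n : Int) : Bool :=
  let k : Nat := (if n > 1 then n - 1 else 0).toNat
  let r := powLoop ⟨1, 0, 0, 1⟩ ⟨2, 1, 1, 0⟩ k
  let dem := 2 * r.a + r.b
  let num := 2 * r.c + r.d
  let p := dem + num
  decide (PySem.Str.len (PySem.Int.toStr p) > PySem.Str.len (PySem.Int.toStr dem))

-- ===== PRECONDITION & SPEC =====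
def Spec_checkTerm (n : Int) (out : Bool) : Prop := out = checkTerm_alt n
instance (n : Int) (out : Bool) : Decidable (Spec_checkTerm n out) := by unfold Spec_checkTerm; infer_instance

-- ===== CLAIM (what is proved, stated in full; the proofs are below) =====
def Claim_equal_checkTerm : Prop := ∀ (n : Int), Dom_checkTerm n → Spec_checkTerm n (checkTerm n)

-- ===== LEMMAS AND PROOFS =====

-- A's loop body as a function on the (num, dem) pair
def pellStep (p : Int × Int) : Int × Int := (p.2, p.2 * 2 + p.1)

-- matrix power, left-multiplication form
def mpow (m : Mat2) : Nat → Mat2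
  | 0 => ⟨1, 0, 0, 1⟩
  | k + 1 => mmul m (mpow m k)

theorem mmul_assoc (x y z : Mat2) : mmul (mmul x y) z = mmul x (mmul y z) := by
  simp only [mmul, Mat2.mk.injEq]
  refine ⟨by ring, by ring, by ring, by ring⟩

theorem mmul_id_left (x : Mat2) : mmul ⟨1, 0, 0, 1⟩ x = x := by
  cases x; simp [mmul]

theorem mmul_id_right (x : Mat2) : mmul x ⟨1, 0, 0, 1⟩ = x := by
  cases x; simp [mmul]

theorem mpow_two_mul (m : Mat2) (j : Nat) : mpow m (2 * j) = mpow (mmul m m) j := by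
  induction j with
  | zero => rfl
  | succ j ih =>
      have h : 2 * (j + 1) = (2 * j + 1) + 1 := by omega
      rw [h]
      show mmul m (mmul m (mpow m (2 * j))) = mmul (mmul m m) (mpow (mmul m m) j)
      rw [ih, mmul_assoc]

theorem mpow_two_mul_add_one (m : Mat2) (j : Nat) :
    mpow m (2 * j + 1) = mmul m (mpow (mmul m m) j) := by
  show mmul m (mpow m (2 * j)) = _
  rw [mpow_two_mul]

theorem powLoop_eq (k : Nat) : ∀ res base, powLoop res base k = mmul res (mpow base k) := by
  induction k using Nat.strong_induction_on with
  | _ k ih =>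
    cases k with
    | zero => intro res base; simp [powLoop, mpow, mmul_id_right]
    | succ k =>
        intro res base
        rw [powLoop, ih ((k + 1) / 2) (by omega)]
        by_cases hodd : (k + 1) % 2 = 1
        · have hk : k + 1 = 2 * ((k + 1) / 2) + 1 := by omega
          rw [if_pos hodd, mmul_assoc]
          conv_rhs => rw [hk, mpow_two_mul_add_one]
        · have hk : k + 1 = 2 * ((k + 1) / 2) := by omega
          rw [if_neg hodd]
          conv_rhs => rw [hk, mpow_two_mul]

-- A's state after k loop iterations
def stIter : Nat → Int × Int
  | 0 => (1, 2)
  | k + 1 => pellStep (stIter k)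

theorem act (k : Nat) :
    2 * (mpow ⟨2, 1, 1, 0⟩ k).a + (mpow ⟨2, 1, 1, 0⟩ k).b = (stIter k).2 ∧
    2 * (mpow ⟨2, 1, 1, 0⟩ k).c + (mpow ⟨2, 1, 1, 0⟩ k).d = (stIter k).1 := by
  induction k with
  | zero => simp [mpow, stIter]
  | succ k ih =>
      obtain ⟨h1, h2⟩ := ih
      constructor
      · show 2 * (2 * (mpow ⟨2,1,1,0⟩ k).a + 1 * (mpow ⟨2,1,1,0⟩ k).c) +
              (2 * (mpow ⟨2,1,1,0⟩ k).b + 1 * (mpow ⟨2,1,1,0⟩ k).d) = (stIter k).2 * 2 + (stIter k).1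
        omega
      · show 2 * (1 * (mpow ⟨2,1,1,0⟩ k).a + 0 * (mpow ⟨2,1,1,0⟩ k).c) +
              (1 * (mpow ⟨2,1,1,0⟩ k).b + 0 * (mpow ⟨2,1,1,0⟩ k).d) = (stIter k).2
        omega

theorem foldl_const_step (l : List Int) (s : Int × Int) :
    l.foldl (fun (p : Int × Int) _ => (p.2, p.2 * 2 + p.1)) s = pellStep^[l.length] s := by
  induction l generalizing s with
  | nil => rfl
  | cons x xs ih =>
      simp only [List.foldl_cons, List.length_cons, ih, Function.iterate_succ_apply]
      rfl

theorem stIter_eq_iterate (k : Nat) : stIter k = pellStep^[k] (1, 2) := by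
  induction k with
  | zero => rfl
  | succ k ih => rw [Function.iterate_succ_apply', ← ih]; rfl

-- ===== VERDICT (by name: the statement is the Claim_ definition above) =====
theorem checkTerm_spec : Claim_equal_checkTerm := by
  intro n _
  show checkTerm n = checkTerm_alt n
  unfold checkTerm checkTerm_alt
  dsimp only
  have hk : (if n > 1 then n - 1 else 0).toNat = (n - 1).toNat := by
    split_ifs <;> omega
  rw [hk, powLoop_eq, mmul_id_left, foldl_const_step, PySem.List.length_pyRange_one]
  have hlen : (n - 1 - 0).toNat = (n - 1).toNat := by omega
  rw [hlen]
  obtain ⟨h1, h2⟩ := act (n - 1).toNat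
  rw [stIter_eq_iterate] at h1 h2
  rw [h1, h2]
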